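-- pv_equiv track=rewrite | github.com/arifakyol/AIEditor | ui_manager.py | _map_clean_to_raw_offset
-- ===== SOURCE A (Python) =====
-- def _map_clean_to_raw_offset(raw_text, clean_offset):
--     """Maps a clean text offset to a raw text offset, correctly handling markers."""
--     clean_chars_seen = 0
--     raw_pos = 0
--     markers = ['###', '>>>', '<<<', '*B*', '*I*', '*U*', '{', '}']
--
--     # Special case for the start of the selection (offset 0)
--     # We need to find the position of the very first content character.
--     if clean_offset == 0:
--         while raw_pos < len(raw_text):
--             is_marker = False
--             for marker in markers:
--                 if raw_text.startswith(marker, raw_pos):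
--                     raw_pos += len(marker)
--                     is_marker = True
--                     break
--             if not is_marker:
--                 return raw_pos  # Found the start of the first character
--         return raw_pos  # Reached end of string
--
--     # For other offsets, we need to find the position *after* the Nth character.
--     while raw_pos < len(raw_text):
--         is_marker = False
--         for marker in markers:
--             if raw_text.startswith(marker, raw_pos):
--                 raw_pos += len(marker)
--                 is_marker = True
--                 break
--
--         if not is_marker:
--             # It's a content character
--             raw_pos += 1
--             clean_chars_seen += 1
--             if clean_chars_seen == clean_offset:
--                 return raw_pos # Found the position right after the target character
--
--     return raw_pos # Fallback for offsets beyond the text length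
-- ===== SOURCE B (Python) =====
-- def _map_clean_to_raw_offset(raw_text, clean_offset):
--     """Maps a clean text offset to a raw text offset via a precomputed table of
--     content-character start positions (one marker-skipping pass, then O(1) lookup)."""
--     markers = ['###', '>>>', '<<<', '*B*', '*I*', '*U*', '{', '}']
--     n = len(raw_text)
--     starts = []
--     i = 0
--     while i < n:
--         for marker in markers:
--             if raw_text.startswith(marker, i):
--                 i += len(marker)
--                 break
--         else:
--             starts.append(i)
--             i += 1
--     if clean_offset == 0:
--         return starts[0] if starts else n
--     if 1 <= clean_offset <= len(starts):
--         return starts[clean_offset - 1] + 1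
--     return n
-- ===== Notes on version B (the rewrite author's own statement) =====
-- stated objective: alternative
-- what changed: Replaces A's two special-cased early-exit scanning loops by one marker-skipping pass that builds a table of content-character start indices, answering any offset by a single table lookup.
import Mathlib
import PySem

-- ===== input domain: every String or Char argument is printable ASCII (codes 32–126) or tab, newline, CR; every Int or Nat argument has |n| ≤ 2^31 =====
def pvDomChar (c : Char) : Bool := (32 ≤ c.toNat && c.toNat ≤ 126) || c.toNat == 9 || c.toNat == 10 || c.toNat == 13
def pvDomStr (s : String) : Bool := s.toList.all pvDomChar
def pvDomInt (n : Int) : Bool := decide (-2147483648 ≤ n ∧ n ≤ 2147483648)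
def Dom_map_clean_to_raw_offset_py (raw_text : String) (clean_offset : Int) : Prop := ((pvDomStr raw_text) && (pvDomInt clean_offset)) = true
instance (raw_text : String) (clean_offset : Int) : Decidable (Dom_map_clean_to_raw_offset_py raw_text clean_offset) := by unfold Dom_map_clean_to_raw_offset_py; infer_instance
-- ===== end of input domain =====

-- B replaces A's two special-cased early-exit scans by one pass building a table of
-- content-character start indices plus an O(1) lookup (alternative decomposition, same cost).

-- ===== PORT A =====

-- the ordered marker test shared by both Pythons: the inner `for marker in markers:
-- if raw_text.startswith(marker, raw_pos)` loop; returns the length of the first matching marker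
def pvSkipMarker (cs : List Char) : Option Nat :=
  if ['#','#','#'].isPrefixOf cs then some 3
  else if ['>','>','>'].isPrefixOf cs then some 3
  else if ['<','<','<'].isPrefixOf cs then some 3
  else if ['*','B','*'].isPrefixOf cs then some 3
  else if ['*','I','*'].isPrefixOf cs then some 3
  else if ['*','U','*'].isPrefixOf cs then some 3
  else if ['{'].isPrefixOf cs then some 1
  else if ['}'].isPrefixOf cs then some 1
  else none

theorem pvSkipMarker_some {cs : List Char} {k : Nat} (h : pvSkipMarker cs = some k) :
    1 ≤ k ∧ k ≤ cs.length := by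
  unfold pvSkipMarker at h
  split_ifs at h with h1 h2 h3 h4 h5 h6 h7 h8 <;>
    first
    | (injection h with h; subst h
       constructor
       · omega
       · first
         | exact (List.isPrefixOf_iff_prefix.mp h1).length_le
         | exact (List.isPrefixOf_iff_prefix.mp h2).length_le
         | exact (List.isPrefixOf_iff_prefix.mp h3).length_le
         | exact (List.isPrefixOf_iff_prefix.mp h4).length_le
         | exact (List.isPrefixOf_iff_prefix.mp h5).length_le
         | exact (List.isPrefixOf_iff_prefix.mp h6).length_le
         | exact (List.isPrefixOf_iff_prefix.mp h7).length_le
         | exact (List.isPrefixOf_iff_prefix.mp h8).length_le)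

-- A's first loop (clean_offset == 0): position of the first content character, or len
def pvFirstContent (cs : List Char) (pos : Nat) : Nat :=
  match cs with
  | [] => pos
  | c :: rest =>
    match h : pvSkipMarker (c :: rest) with
    | some k => pvFirstContent ((c :: rest).drop k) (pos + k)
    | none => pos
termination_by cs.length
decreasing_by
  have := pvSkipMarker_some h
  simp only [List.length_drop]
  simp at this ⊢
  omega

-- A's second loop: position right after the clean_offset-th content character, or len
def pvLoopA (cs : List Char) (pos : Nat) (seen t : Int) : Int :=
  match cs with
  | [] => (pos : Int)
  | c :: rest =>
    match h : pvSkipMarker (c :: rest) with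
    | some k => pvLoopA ((c :: rest).drop k) (pos + k) seen t
    | none =>
      if seen + 1 = t then ((pos + 1 : Nat) : Int)
      else pvLoopA rest (pos + 1) (seen + 1) t
termination_by cs.length
decreasing_by
  · have := pvSkipMarker_some h
    simp only [List.length_drop]
    simp at this ⊢
    omega
  · simp

def map_clean_to_raw_offset_py (raw_text : String) (clean_offset : Int) : Int :=
  if clean_offset = 0 then (pvFirstContent raw_text.toList 0 : Int)
  else pvLoopA raw_text.toList 0 0 clean_offset

-- ===== PORT B =====

-- the single pass of Source B: start indices of all content characters, in order
def pvStarts (cs : List Char) (pos : Nat) : List Nat :=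
  match cs with
  | [] => []
  | c :: rest =>
    match h : pvSkipMarker (c :: rest) with
    | some k => pvStarts ((c :: rest).drop k) (pos + k)
    | none => pos :: pvStarts rest (pos + 1)
termination_by cs.length
decreasing_by
  · have := pvSkipMarker_some h
    simp only [List.length_drop]
    simp at this ⊢
    omega
  · simp

def map_clean_to_raw_offset_py_alt (raw_text : String) (clean_offset : Int) : Int :=
  let cs := raw_text.toList
  let n := cs.length
  let starts := pvStarts cs 0
  if clean_offset = 0 then
    match starts with
    | [] => (n : Int)
    | s :: _ => (s : Int)
  else if 1 ≤ clean_offset ∧ clean_offset ≤ starts.length then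
    ((starts.getD (clean_offset - 1).toNat 0 : Nat) + 1 : Int)
  else (n : Int)

-- ===== PRECONDITION & SPEC =====
def Spec_map_clean_to_raw_offset_py (raw_text : String) (clean_offset : Int) (out : Int) : Prop := out = map_clean_to_raw_offset_py_alt raw_text clean_offset
instance (raw_text : String) (clean_offset : Int) (out : Int) : Decidable (Spec_map_clean_to_raw_offset_py raw_text clean_offset out) := by unfold Spec_map_clean_to_raw_offset_py; infer_instance

-- ===== CLAIM (what is proved, stated in full; the proofs are below) =====
def Claim_equal_map_clean_to_raw_offset_py : Prop := ∀ (raw_text : String) (clean_offset : Int), Dom_map_clean_to_raw_offset_py raw_text clean_offset → Spec_map_clean_to_raw_offset_py raw_text clean_offset (map_clean_to_raw_offset_py raw_text clean_offset)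

-- ===== LEMMAS AND PROOFS =====

theorem pvFirstContent_eq (cs : List Char) (pos : Nat) :
    pvFirstContent cs pos =
      (match pvStarts cs pos with
       | [] => pos + cs.length
       | s :: _ => s) := by
  induction cs, pos using pvStarts.induct with
  | case1 pos => simp [pvFirstContent, pvStarts]
  | case2 pos c rest k h ih =>
    rw [pvFirstContent, pvStarts, h]; simp only []
    rw [ih]
    have hk := pvSkipMarker_some h
    have hlen : pos + k + ((c :: rest).drop k).length = pos + (c :: rest).length := by
      simp only [List.length_drop, List.length_cons] at hk ⊢
      omega
    rw [hlen]
  | case3 pos c rest h ih =>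
    rw [pvFirstContent, pvStarts, h]

theorem pvLoopA_eq (cs : List Char) (pos : Nat) (seen t : Int) :
    pvLoopA cs pos seen t =
      (if 1 ≤ t - seen ∧ t - seen ≤ (pvStarts cs pos).length then
        (((pvStarts cs pos).getD (t - seen - 1).toNat 0 : Nat) + 1 : Int)
       else ((pos + cs.length : Nat) : Int)) := by
  induction cs, pos using pvStarts.induct generalizing seen with
  | case1 pos =>
    simp [pvLoopA, pvStarts]
    intro h1 h2
    omega
  | case2 pos c rest k h ih =>
    rw [pvLoopA, pvStarts, h]; simp only []
    rw [ih]
    have hk := pvSkipMarker_some h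
    have : pos + k + ((c :: rest).drop k).length = pos + (c :: rest).length := by
      simp only [List.length_drop, List.length_cons] at hk ⊢
      omega
    rw [this]
  | case3 pos c rest h ih =>
    rw [pvLoopA, pvStarts, h]; simp only []
    by_cases he : seen + 1 = t
    · have h1 : t - seen = 1 := by omega
      simp [he, h1]
    · rw [if_neg he, ih]
      have hlen : (pvStarts rest (pos + 1)).length = (pos :: pvStarts rest (pos + 1)).length - 1 := by simp
      by_cases hc : 1 ≤ t - (seen + 1) ∧ t - (seen + 1) ≤ ((pvStarts rest (pos + 1)).length : Int)
      · have hc' : 1 ≤ t - seen ∧ t - seen ≤ ((pos :: pvStarts rest (pos + 1)).length : Int) := by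
          simp at hc ⊢
          omega
        rw [if_pos hc, if_pos hc']
        have hidx : (t - seen - 1).toNat = (t - (seen + 1) - 1).toNat + 1 := by omega
        rw [hidx]
        simp [List.getD]
      · have hc' : ¬(1 ≤ t - seen ∧ t - seen ≤ ((pos :: pvStarts rest (pos + 1)).length : Int)) := by
          simp only [List.length_cons, Nat.cast_add, Nat.cast_one] at hc ⊢
          omega
        rw [if_neg hc, if_neg hc']
        simp
        omega

-- ===== VERDICT (by name: the statement is the Claim_ definition above) =====
theorem map_clean_to_raw_offset_py_spec : Claim_equal_map_clean_to_raw_offset_py := by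
  intro raw_text clean_offset _
  unfold Spec_map_clean_to_raw_offset_py map_clean_to_raw_offset_py map_clean_to_raw_offset_py_alt
  by_cases h0 : clean_offset = 0
  · simp only [h0]
    rw [pvFirstContent_eq]
    cases pvStarts raw_text.toList 0 <;> simp
  · simp only [if_neg h0]
    rw [pvLoopA_eq]
    simp only [sub_zero, Nat.zero_add]
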